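-- pv_equiv track=rewrite | github.com/dzikimlecz/wdi | z5/z11.py | z11
-- ===== SOURCE A (Python) =====
-- def z11(T, Q, N):
--     llen = len(T)
--     cnt = 0
--     if llen == 0:
--         return 0
--     if N == 1:
--         for e in T:
--             if e == Q:
--                 cnt += 1
--     else:
--         if Q % T[0] == 0:
--             cnt += z11(ohne(T, 0), Q // T[0], N - 1)
--         cnt += z11(ohne(T, 0), Q, N)
--     return cnt
--
-- def ohne(T, ix):
--     return T[:ix] + T[ix + 1:]
-- ===== SOURCE B (Python) =====
-- def comb_(n, k):
--     if k < 0 or k > n: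
--         return 0
--     r = 1
--     for i in range(k):
--         r = r * (n - i) // (i + 1)
--     return r
--
--
-- def z11(T, Q, N):
--     # count the size-N subsequences of T whose product is Q
--     if N < 1:
--         return 0
--     if Q == 0:
--         # a product is 0 iff the subsequence contains a zero
--         nz = 0
--         for t in T:
--             if t != 0:
--                 nz += 1
--         return comb_(len(T), N) - comb_(nz, N)
--     # DP over (picked count k, remaining quotient q): dp[(k, q)] = number of
--     # size-k subsequences s of the processed prefix with prod(s) * q == Q.
--     dp = {(0, Q): 1}
--     for t in T:
--         if t == 0:
--             continue
--         for (k, q), c in list(dp.items()):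
--             if k < N and q % t == 0:
--                 key = (k + 1, q // t)
--                 dp[key] = dp.get(key, 0) + c
--     return dp.get((N, 1), 0)
-- ===== Notes on version B (the rewrite author's own statement) =====
-- stated objective: faster
-- what changed: Replaced the exponential include/exclude recursion by an iterative DP over (picked-count, remaining-quotient) states keyed by divisors of Q, with a closed-form binomial count for Q == 0.
-- crash fix: When N != 1 and T contains a 0, A raises ZeroDivisionError on 'Q % 0'; B returns the true count of size-N subsequences with product Q. — e.g. on z11([0, 2, 3], 0, 2): A raises ZeroDivisionError, B returns 2
import Mathlib
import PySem

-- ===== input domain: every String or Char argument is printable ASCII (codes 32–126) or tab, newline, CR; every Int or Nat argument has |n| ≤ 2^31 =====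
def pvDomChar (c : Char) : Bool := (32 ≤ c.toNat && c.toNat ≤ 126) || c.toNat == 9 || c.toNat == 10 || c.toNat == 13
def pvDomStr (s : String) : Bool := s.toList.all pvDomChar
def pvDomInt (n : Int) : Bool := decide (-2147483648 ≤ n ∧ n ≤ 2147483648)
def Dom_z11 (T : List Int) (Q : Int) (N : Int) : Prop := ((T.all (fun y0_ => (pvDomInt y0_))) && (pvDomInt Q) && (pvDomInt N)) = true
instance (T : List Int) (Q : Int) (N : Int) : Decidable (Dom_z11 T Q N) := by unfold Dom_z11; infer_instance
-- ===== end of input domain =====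

-- B replaces A's exponential include/exclude recursion by an iterative DP over
-- (picked count, remaining quotient) states plus a closed-form binomial count for Q = 0 (objective: faster).

-- ===== PORT A =====
def ohne (T : List Int) (ix : Int) : List Int :=
  PySem.List.slice T none (some ix) ++ PySem.List.slice T (some (ix + 1)) none

theorem ohne_zero_tail (T : List Int) : ohne T 0 = T.tail := by
  have h1 : PySem.List.slice T none (some (0:Int)) = [] := by
    rw [PySem.List.slice_to T (le_refl 0)]; simp
  have h2 : ((0:Int) + 1) = 1 := by norm_num
  simp [ohne, h1, h2, PySem.List.slice_from_one]

theorem pv_tail_length_lt (T : List Int) (h : ¬T.length = 0) : T.tail.length < T.length := by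
  cases T <;> simp_all

def z11 (T : List Int) (Q : Int) (N : Int) : Int :=
  if T.length = 0 then 0
  else if N = 1 then
    T.foldl (fun cnt e => if e = Q then cnt + 1 else cnt) 0
  else
    (if PySem.Int.mod Q (PySem.List.pyGetD T 0 0) = 0 then
      z11 (ohne T 0) (PySem.Int.floordiv Q (PySem.List.pyGetD T 0 0)) (N - 1)
    else 0) + z11 (ohne T 0) Q N
termination_by T.length
decreasing_by
  · rw [ohne_zero_tail]; exact pv_tail_length_lt T (by assumption)
  · rw [ohne_zero_tail]; exact pv_tail_length_lt T (by assumption)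

-- ===== PORT B =====
def comb_ (n : Int) (k : Int) : Int :=
  if k < 0 ∨ n < k then 0
  else (PySem.List.pyRange 0 k 1).foldl
    (fun r i => PySem.Int.floordiv (r * (n - i)) (i + 1)) 1

-- the body of B's inner 'for (k, q), c in list(dp.items())' loop
def dpUpd (N t : Int) (d : PySem.Dict (Int × Int) Int) (kv : (Int × Int) × Int) :
    PySem.Dict (Int × Int) Int :=
  if kv.1.1 < N ∧ PySem.Int.mod kv.1.2 t = 0 then
    let key := (kv.1.1 + 1, PySem.Int.floordiv kv.1.2 t)
    d.insert key (d.getD key 0 + kv.2)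
  else d

def z11_alt (T : List Int) (Q : Int) (N : Int) : Int :=
  if N < 1 then 0
  else if Q = 0 then
    -- a product is 0 iff the subsequence contains a zero
    let nz := T.foldl (fun nz t => if t ≠ 0 then nz + 1 else nz) 0
    comb_ T.length N - comb_ nz N
  else
    let dp := T.foldl
      (fun dp t => if t = 0 then dp else dp.items.foldl (dpUpd N t) dp)
      (PySem.Dict.ofList [((0, Q), 1)])
    dp.getD (N, 1) 0

-- ===== PRECONDITION & SPEC =====
-- Pre_ excludes exactly the inputs on which A raises ZeroDivisionError ('Q % 0'):
-- T containing a 0 while N != 1.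
def Pre_z11 (T : List Int) (Q : Int) (N : Int) : Prop := N = 1 ∨ (0 : Int) ∉ T
instance (T : List Int) (Q : Int) (N : Int) : Decidable (Pre_z11 T Q N) := by
  unfold Pre_z11; infer_instance

def pvWitness_z11 : List Int × Int × Int := ([2, 3, 6, -1], 6, 2)

-- When N ≠ 1 and T contains a 0, A raises ZeroDivisionError on 'Q % 0';
-- B returns the number of size-N subsequences of T whose product is Q.
def Raises_z11 (T : List Int) (Q : Int) (N : Int) : Prop := N ≠ 1 ∧ (0 : Int) ∈ T
instance (T : List Int) (Q : Int) (N : Int) : Decidable (Raises_z11 T Q N) := by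
  unfold Raises_z11; infer_instance
def pvRaiseWitness_z11 : List Int × Int × Int := ([0, 2, 3], 0, 2)
def pvRaiseWitnessOut_z11 : Int := 2

def Spec_z11 (T : List Int) (Q : Int) (N : Int) (out : Int) : Prop := out = z11_alt T Q N
instance (T : List Int) (Q : Int) (N : Int) (out : Int) : Decidable (Spec_z11 T Q N out) := by
  unfold Spec_z11; infer_instance

-- ===== CLAIM (what is proved, stated in full; the proofs are below) =====
def Claim_equal_z11 : Prop := ∀ (T : List Int) (Q : Int) (N : Int), Dom_z11 T Q N → Pre_z11 T Q N → Spec_z11 T Q N (z11 T Q N)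

def Claim_raises_z11 : Prop := (∀ (T : List Int) (Q : Int) (N : Int), Dom_z11 T Q N → Raises_z11 T Q N → ¬ Pre_z11 T Q N) ∧ (Dom_z11 (pvRaiseWitness_z11.1) (pvRaiseWitness_z11.2.1) (pvRaiseWitness_z11.2.2) ∧ Raises_z11 (pvRaiseWitness_z11.1) (pvRaiseWitness_z11.2.1) (pvRaiseWitness_z11.2.2) ∧ z11_alt (pvRaiseWitness_z11.1) (pvRaiseWitness_z11.2.1) (pvRaiseWitness_z11.2.2) = pvRaiseWitnessOut_z11)

-- ===== LEMMAS AND PROOFS =====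

-- the common specification: number of sublists of T of length k whose product times q is Q
def cnt (Q : Int) (T : List Int) (k : Int) (q : Int) : Int :=
  if 0 ≤ k then ((T.sublistsLen k.toNat).countP (fun s => decide (s.prod * q = Q)) : Int)
  else 0

theorem cnt_zero (Q : Int) (T : List Int) (q : Int) :
    cnt Q T 0 q = if q = Q then 1 else 0 := by
  by_cases h : q = Q <;> simp [cnt, List.sublistsLen_zero, h]
theorem cnt_nil (Q : Int) (k q : Int) (hk : 1 ≤ k) : cnt Q [] k q = 0 := by
  have h2 : k.toNat = (k.toNat - 1) + 1 := by omega
  rw [cnt, if_pos (by omega), h2]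
  simp [List.sublistsLen_succ_nil]
theorem cnt_cons (Q : Int) (t : Int) (P : List Int) (k q : Int) :
    cnt Q (t :: P) k q
      = cnt Q P k q + (if 1 ≤ k then cnt Q P (k - 1) (t * q) else 0) := by
  rcases lt_trichotomy k 0 with hk | hk | hk
  · simp [cnt, not_le.mpr hk, if_neg (by omega : ¬ (1:Int) ≤ k)]
  · subst hk; rw [cnt_zero, cnt_zero]; simp
  · have h1 : (1:Int) ≤ k := hk
    have h2 : k.toNat = (k.toNat - 1) + 1 := by omega
    have h3 : (k-1).toNat = k.toNat - 1 := by omega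
    rw [if_pos h1, cnt, cnt, cnt, if_pos (by omega : (0:Int) ≤ k), if_pos (by omega : (0:Int) ≤ k),
      if_pos (by omega : (0:Int) ≤ k - 1), h2, h3, List.sublistsLen_succ_cons]
    rw [List.countP_append, List.countP_map]
    push_cast
    norm_cast
    congr 1
    apply List.countP_congr
    intro s _
    simp [Function.comp, List.prod_cons, mul_comm, mul_assoc, mul_left_comm]
theorem cnt_neg (Q : Int) (T : List Int) (k q : Int) (hk : k < 0) : cnt Q T k q = 0 := by
  simp [cnt, not_le.mpr hk]
theorem cnt_append_singleton (Q : Int) (P : List Int) (t : Int) (k q : Int) :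
    cnt Q (P ++ [t]) k q
      = cnt Q P k q + (if 1 ≤ k then cnt Q P (k - 1) (t * q) else 0) := by
  induction P generalizing k q with
  | nil => simpa using cnt_cons Q t [] k q
  | cons p P ih =>
    simp only [List.cons_append, cnt_cons, ih]
    rw [show t * (p * q) = p * (t * q) by ring]
    by_cases h : 1 ≤ k
    · simp only [if_pos h]
      try ring
    · simp only [if_neg h]
      try ring
theorem cnt_one (Q : Int) (T : List Int) :
    cnt Q T 1 1 = (T.countP (fun e => decide (e = Q)) : Int) := by
  induction T with
  | nil => simp [cnt_nil Q 1 1 le_rfl]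
  | cons t P ih =>
    rw [cnt_cons, if_pos le_rfl, ih]
    norm_num [cnt_zero, List.countP_cons]
theorem cnt_zero_q (Q : Int) (hQ : Q ≠ 0) (P : List Int) (k : Int) :
    cnt Q P k (0:Int) = 0 := by
  rcases lt_or_ge k 0 with h | h
  · exact cnt_neg _ _ _ _ h
  · rw [cnt, if_pos h]
    norm_num
    intro s _ _ h
    exact hQ h.symm
theorem cnt_filter (Q : Int) (hQ : Q ≠ 0) (T : List Int) (k q : Int) :
    cnt Q T k q = cnt Q (T.filter (fun t => decide (t ≠ 0))) k q := by
  induction T generalizing k q with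
  | nil => simp
  | cons t P ih =>
    by_cases ht : t = 0
    · subst ht
      rw [List.filter_cons, if_neg (by simp), cnt_cons]
      simp [zero_mul, ih, cnt_zero_q Q hQ]
    · rw [List.filter_cons, if_pos (decide_eq_true ht), cnt_cons, cnt_cons]
      simp only [ih]
theorem cnt_scale (Q q0 t : Int) (ht : t ≠ 0) (hq : q0 * t = Q) (P : List Int) (k : Int) :
    cnt q0 P k 1 = cnt Q P k t := by
  rcases lt_or_ge k 0 with h | h
  · rw [cnt_neg _ _ _ _ h, cnt_neg _ _ _ _ h]
  · rw [cnt, cnt, if_pos h, if_pos h]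
    norm_cast
    apply List.countP_congr
    intro s _
    constructor
    · intro hs
      have : s.prod = q0 := by simpa using of_decide_eq_true hs
      simp [this, hq]
    · intro hs
      have h2 : s.prod * t = Q := of_decide_eq_true hs
      have : s.prod = q0 := by
        apply mul_right_cancel₀ ht; rw [h2, hq]
      simp [this]

theorem comb_one (n : Int) (hn : 0 ≤ n) : comb_ n 1 = n := by
  rcases eq_or_lt_of_le hn with h | h
  · rw [comb_, if_pos (by omega)]; omega
  · rw [comb_, if_neg (by omega)]
    have h1 : PySem.List.pyRange 0 1 1 = [0] := by
      have h2 := PySem.List.pyRange_one_singleton (0:Int)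
      norm_num at h2
      exact h2
    rw [h1]
    simp

theorem sum_zero_of_not_mem (l : List ((Int × Int) × Int)) (K : Int × Int)
    (h : K ∉ l.map (·.1)) :
    (l.map (fun kv => if kv.1 = K then kv.2 else 0)).sum = 0 := by
  induction l with
  | nil => simp
  | cons a l ih =>
    simp only [List.map_cons, List.mem_cons, not_or] at h
    simp only [List.map_cons, List.sum_cons]
    rw [if_neg (fun he => h.1 he.symm), zero_add]
    exact ih h.2

theorem sum_items_eq_getD (l : List ((Int × Int) × Int)) (h : (l.map (·.1)).Nodup)
    (K : Int × Int) :
    (l.map (fun kv => if kv.1 = K then kv.2 else 0)).sum = (PySem.Dict.mk l).getD K 0 := by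
  induction l with
  | nil => rfl
  | cons a l ih =>
    simp only [List.map_cons, List.nodup_cons] at h
    simp only [List.map_cons, List.sum_cons]
    rw [PySem.Dict.getD_eq_get?_getD, PySem.Dict.get?_mk_cons]
    by_cases hK : a.1 = K
    · rw [if_pos hK, if_pos (by simp [hK])]
      rw [sum_zero_of_not_mem l K (hK ▸ h.1), add_zero]
      rfl
    · rw [if_neg hK, if_neg (by simp [hK]), zero_add, ← PySem.Dict.getD_eq_get?_getD]
      exact ih h.2
theorem dpUpd_fold_getD (N t : Int) (its : List ((Int × Int) × Int))
    (d : PySem.Dict (Int × Int) Int) (K : Int × Int) :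
    (its.foldl (dpUpd N t) d).getD K 0
      = d.getD K 0 + (its.map (fun kv =>
          if kv.1.1 < N ∧ PySem.Int.mod kv.1.2 t = 0
              ∧ (kv.1.1 + 1, PySem.Int.floordiv kv.1.2 t) = K then kv.2 else 0)).sum := by
  induction its generalizing d with
  | nil => simp
  | cons kv its ih =>
    simp only [List.foldl_cons, List.map_cons, List.sum_cons]
    rw [ih]
    have hstep : (dpUpd N t d kv).getD K 0
        = d.getD K 0 + (if kv.1.1 < N ∧ PySem.Int.mod kv.1.2 t = 0
            ∧ (kv.1.1 + 1, PySem.Int.floordiv kv.1.2 t) = K then kv.2 else 0) := by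
      rw [dpUpd]
      by_cases hc : kv.1.1 < N ∧ PySem.Int.mod kv.1.2 t = 0
      · rw [if_pos hc]
        by_cases hK : (kv.1.1 + 1, PySem.Int.floordiv kv.1.2 t) = K
        · rw [PySem.Dict.getD_insert, if_pos hK.symm, if_pos ⟨hc.1, hc.2, hK⟩, hK]
        · rw [PySem.Dict.getD_insert, if_neg (fun he => hK he.symm),
            if_neg (fun hcc => hK hcc.2.2), add_zero]
      · rw [if_neg hc, if_neg (fun hcc => hc ⟨hcc.1, hcc.2.1⟩), add_zero]
    rw [hstep, add_assoc]

theorem dpUpd_fold_nodup (N t : Int) (its : List ((Int × Int) × Int))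
    (d : PySem.Dict (Int × Int) Int) (h : d.keys.Nodup) :
    (its.foldl (dpUpd N t) d).keys.Nodup := by
  induction its generalizing d with
  | nil => exact h
  | cons kv its ih =>
    simp only [List.foldl_cons]
    apply ih
    rw [dpUpd]
    by_cases hc : kv.1.1 < N ∧ PySem.Int.mod kv.1.2 t = 0
    · rw [if_pos hc]
      exact PySem.Dict.nodup_keys_insert _ _ _ h
    · rwa [if_neg hc]
theorem fdiv_exact (q t q' : Int) (ht : t ≠ 0) (hdvd : t ∣ q) :
    PySem.Int.floordiv q t = q' ↔ q = q' * t := by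
  have h := PySem.Int.floordiv_mul_add_mod q t
  rw [(PySem.Int.mod_eq_zero_iff_dvd q t).mpr hdvd, add_zero] at h
  constructor
  · intro he; rw [← he, h]
  · intro he; apply mul_right_cancel₀ ht; rw [h, he]

def cntB (Q N : Int) (P : List Int) (k q : Int) : Int :=
  if k ≤ N then cnt Q P k q else 0

theorem dp_step (Q N t : Int) (ht : t ≠ 0) (P : List Int)
    (d : PySem.Dict (Int × Int) Int) (hnd : d.keys.Nodup)
    (hinv : ∀ k q : Int, d.getD (k, q) 0 = cntB Q N P k q) :
    ∀ k q : Int, (d.items.foldl (dpUpd N t) d).getD (k, q) 0 = cntB Q N (P ++ [t]) k q := by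
  intro k q
  rw [dpUpd_fold_getD, hinv]
  have hmap : ∀ kv ∈ d.items,
      (if kv.1.1 < N ∧ PySem.Int.mod kv.1.2 t = 0
          ∧ (kv.1.1 + 1, PySem.Int.floordiv kv.1.2 t) = (k, q) then kv.2 else 0)
      = (if k ≤ N then (if kv.1 = (k - 1, q * t) then kv.2 else 0) else 0) := by
    intro kv _
    by_cases hkN : k ≤ N
    · rw [if_pos hkN]
      by_cases hsrc : kv.1 = (k - 1, q * t)
      · have h1 : kv.1.1 = k - 1 := by rw [hsrc]
        have h2 : kv.1.2 = q * t := by rw [hsrc]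
        rw [if_pos hsrc, if_pos]
        refine ⟨by omega, ?_, ?_⟩
        · rw [h2]
          exact (PySem.Int.mod_eq_zero_iff_dvd _ t).mpr ⟨q, mul_comm q t⟩
        · have hfd : PySem.Int.floordiv kv.1.2 t = q :=
            (fdiv_exact kv.1.2 t q ht (h2 ▸ ⟨q, mul_comm q t⟩)).mpr h2
          rw [hfd, h1]
          have hh : k - 1 + 1 = k := by omega
          rw [hh]
      · rw [if_neg hsrc, if_neg]
        intro hcc
        apply hsrc
        have h3 := hcc.2.2
        have h1 : kv.1.1 + 1 = k := by
          have := congrArg Prod.fst h3; simpa using this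
        have h2 : PySem.Int.floordiv kv.1.2 t = q := by
          have := congrArg Prod.snd h3; simpa using this
        have hdvd : t ∣ kv.1.2 := (PySem.Int.mod_eq_zero_iff_dvd _ t).mp hcc.2.1
        have h4 : kv.1.2 = q * t := (fdiv_exact kv.1.2 t q ht hdvd).mp h2
        have : kv.1 = (kv.1.1, kv.1.2) := rfl
        rw [this, h4]
        simp [Prod.ext_iff]
        omega
    · rw [if_neg hkN, if_neg]
      intro hcc
      have h1 : kv.1.1 + 1 = k := by
        have := congrArg Prod.fst hcc.2.2; simpa using this
      have := hcc.1
      omega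
  rw [List.map_congr_left hmap]
  have hnd' : (d.items.map (·.1)).Nodup := hnd
  by_cases hkN : k ≤ N
  · simp only [if_pos hkN]
    rw [sum_items_eq_getD d.items hnd' (k - 1, q * t)]
    have hd : (PySem.Dict.mk d.items) = d := rfl
    rw [hd, hinv]
    simp only [cntB, if_pos hkN, if_pos (show k - 1 ≤ N by omega)]
    rw [cnt_append_singleton, mul_comm q t]
    by_cases h1 : 1 ≤ k
    · rw [if_pos h1]
    · rw [if_neg h1, cnt_neg _ _ _ _ (by omega : k - 1 < 0)]
  · simp only [if_neg hkN]
    simp only [cntB, if_neg hkN]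
    simp
theorem dp_loop (Q N : Int) (rest : List Int) : ∀ (P : List Int)
    (d : PySem.Dict (Int × Int) Int), d.keys.Nodup →
    (∀ k q : Int, d.getD (k, q) 0 = cntB Q N P k q) →
    ∀ k q : Int,
      (rest.foldl (fun dp t => if t = 0 then dp else dp.items.foldl (dpUpd N t) dp) d).getD (k, q) 0
        = cntB Q N (P ++ rest.filter (fun t => decide (t ≠ 0))) k q := by
  induction rest with
  | nil =>
    intro P d hnd hinv k q
    simpa using hinv k q
  | cons t rest ih =>
    intro P d hnd hinv k q
    simp only [List.foldl_cons, List.filter_cons]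
    by_cases ht : t = 0
    · subst ht
      rw [if_pos rfl, if_neg (by simp)]
      exact ih P d hnd hinv k q
    · rw [if_neg ht, if_pos (decide_eq_true ht)]
      have h1 := dp_step Q N t ht P d hnd hinv
      have h2 := dpUpd_fold_nodup N t d.items d hnd
      have h3 := ih (P ++ [t]) _ h2 h1 k q
      simpa [List.append_assoc] using h3

theorem cnt_zero_Q_of_no_zero (T : List Int) (N : Int) (hN : 1 ≤ N)
    (hmem : (0:Int) ∉ T) : cnt 0 T N 1 = 0 := by
  rw [cnt, if_pos (by omega)]
  norm_num
  intro s hs hl h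
  exact hmem (hs.subset h)

theorem z11_alt_eq_cnt (T : List Int) (Q N : Int) (hN : 1 ≤ N)
    (hpre : N = 1 ∨ (0 : Int) ∉ T) : z11_alt T Q N = cnt Q T N 1 := by
  rw [z11_alt, if_neg (by omega : ¬ N < 1)]
  have hnz : T.foldl (fun nz t => if t ≠ 0 then nz + 1 else nz) 0
      = (T.countP (fun t => decide (t ≠ 0)) : Int) := by
    have h := PySem.List.foldl_count_if (fun t => decide (t ≠ 0)) T 0
    simpa using h
  by_cases hQ : Q = 0
  · subst hQ
    rw [if_pos rfl]
    simp only [hnz]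
    by_cases hmem : (0:Int) ∈ T
    · have hN1 : N = 1 := by
        rcases hpre with h | h
        · exact h
        · exact absurd hmem h
      subst hN1
      rw [cnt_one, comb_one _ (Int.natCast_nonneg _), comb_one _ (Int.natCast_nonneg _)]
      have hlen := List.length_eq_countP_add_countP (fun e : Int => decide (e = 0)) (l := T)
      have hcc : T.countP (fun t => decide (t ≠ 0))
          = T.countP (fun a => decide ¬(decide (a = 0)) = true) := by
        apply List.countP_congr
        intro a _
        simp
      rw [hcc]
      omega
    · rw [List.countP_eq_length.mpr (fun a ha => by
        simp only [decide_eq_true_eq, ne_eq]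
        exact fun h => hmem (h ▸ ha)), sub_self]
      rw [cnt_zero_Q_of_no_zero T N hN hmem]
  · rw [if_neg hQ]
    have base_nodup : (PySem.Dict.ofList [(((0:Int), Q), (1:Int))]).keys.Nodup := by
      exact PySem.Dict.nodup_keys_ofList _
    have base_inv : ∀ k q : Int,
        (PySem.Dict.ofList [(((0:Int), Q), (1:Int))]).getD (k, q) 0 = cntB Q N [] k q := by
      intro k q
      rw [show PySem.Dict.ofList [(((0:Int), Q), (1:Int))]
            = (PySem.Dict.empty).insert (0, Q) 1 from rfl, PySem.Dict.getD_insert]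
      by_cases hk : ((k, q) : Int × Int) = ((0:Int), Q)
      · have h1 : k = 0 := by simpa using congrArg Prod.fst hk
        have h2 : q = Q := by simpa using congrArg Prod.snd hk
        subst h1; subst h2
        rw [if_pos rfl, cntB, if_pos (by omega), cnt_zero, if_pos rfl]
      · rw [if_neg hk, PySem.Dict.getD_empty, cntB]
        by_cases hkN : k ≤ N
        · rw [if_pos hkN]
          rcases lt_trichotomy k 0 with h | h | h
          · rw [cnt_neg _ _ _ _ h]
          · subst h
            rw [cnt_zero, if_neg (fun hh => hk (by simp [hh]))]
          · rw [cnt_nil _ _ _ (by omega)]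
        · rw [if_neg hkN]
    have hmain := dp_loop Q N T [] _ base_nodup base_inv N 1
    simp only [List.nil_append] at hmain
    simp only [hmain, cntB, if_pos (le_refl N), ← cnt_filter Q hQ]

theorem z11_nonpos (T : List Int) (Q N : Int) (hN : N ≤ 0) : z11 T Q N = 0 := by
  induction T generalizing Q N with
  | nil => rw [z11]; simp
  | cons t P ih =>
    rw [z11]
    have h1 : ¬(t :: P).length = 0 := by simp
    have h2 : N ≠ 1 := by omega
    rw [if_neg h1, if_neg h2, ohne_zero_tail]
    simp only [List.tail_cons]
    rw [ih Q N hN, ih _ _ (by omega : N - 1 ≤ 0)]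
    simp
theorem z11_eq_cnt (T : List Int) (Q N : Int) (hN : 1 ≤ N)
    (hpre : N = 1 ∨ (0 : Int) ∉ T) : z11 T Q N = cnt Q T N 1 := by
  induction T generalizing Q N with
  | nil => rw [z11]; simp [cnt_nil Q N 1 hN]
  | cons t P ih =>
    rw [z11, if_neg (by simp)]
    by_cases h1 : N = 1
    · subst h1
      rw [cnt_one, if_pos rfl]
      have hc := PySem.List.foldl_count_if (fun e => decide (e = Q)) (t :: P) 0
      simpa using hc
    · have hnotin : (0:Int) ∉ t :: P := by
        rcases hpre with h | h
        · omega
        · exact h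
      have ht : t ≠ 0 := fun h => hnotin (h ▸ List.mem_cons_self)
      have hP : (0:Int) ∉ P := fun h => hnotin (List.mem_cons_of_mem t h)
      rw [if_neg h1, ohne_zero_tail]
      simp only [List.tail_cons]
      rw [PySem.List.pyGetD_zero_cons]
      rw [cnt_cons, if_pos hN, mul_one]
      rw [ih Q N hN (Or.inr hP)]
      by_cases hdvd : t ∣ Q
      · rw [if_pos ((PySem.Int.mod_eq_zero_iff_dvd Q t).mpr hdvd)]
        rw [ih _ _ (by omega) (Or.inr hP)]
        have hfd : PySem.Int.floordiv Q t * t = Q := by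
          have h := PySem.Int.floordiv_mul_add_mod Q t
          rw [(PySem.Int.mod_eq_zero_iff_dvd Q t).mpr hdvd, add_zero] at h
          exact h
        rw [cnt_scale Q (PySem.Int.floordiv Q t) t ht hfd P (N - 1)]
        ring
      · rw [if_neg (fun hc => hdvd ((PySem.Int.mod_eq_zero_iff_dvd Q t).mp hc))]
        have hz : cnt Q P (N - 1) t = 0 := by
          rw [cnt, if_pos (by omega)]
          norm_num
          intro s _ _ h
          exact hdvd ⟨s.prod, by rw [← h]; ring⟩
        rw [hz]
        ring

-- ===== VERDICT (by name: the statement is the Claim_ definition above) =====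
theorem z11_spec : Claim_equal_z11 := by
  intro T Q N _ hpre
  unfold Spec_z11
  by_cases hN : N < 1
  · rw [z11_nonpos T Q N (by omega), z11_alt]
    simp [hN]
  · rw [z11_eq_cnt T Q N (by omega) hpre, z11_alt_eq_cnt T Q N (by omega) hpre]

theorem z11_raises : Claim_raises_z11 := by
  unfold Claim_raises_z11
  constructor
  · intro T Q N _ hr hpre
    rcases hr with ⟨h1, h2⟩
    rcases hpre with h | h
    · exact h1 h
    · exact h h2
  · decide

-- self-check: the crash-fix witness value certified by z11_raises
theorem z11_raises_witness_ok :
    z11_alt pvRaiseWitness_z11.1 pvRaiseWitness_z11.2.1 pvRaiseWitness_z11.2.2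
      = pvRaiseWitnessOut_z11 :=
  z11_raises.2.2.2
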